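-- pv_equiv track=rewrite | github.com/chrislit/abydos | abydos/distance/_marking.py | dist_abs
-- ===== SOURCE A (Python) =====
-- def dist_abs(src, tar):
--     """Return the marking distance of two strings.
--
--     Parameters
--     ----------
--     src : str
--         Source string (or QGrams/Counter objects) for comparison
--     tar : str
--         Target string (or QGrams/Counter objects) for comparison
--
--     Returns
--     -------
--     int
--         marking distance
--
--     Examples
--     --------
--     >>> cmp = Marking()
--     >>> cmp.dist_abs('cat', 'hat')
--     1
--     >>> cmp.dist_abs('Niall', 'Neil')
--     3
--     >>> cmp.dist_abs('aluminum', 'Catalan')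
--     5
--     >>> cmp.dist_abs('ATCG', 'TAGC')
--     2
--     >>> cmp.dist_abs('cbaabdcb', 'abcba')
--     2
--
--
--     .. versionadded:: 0.4.0
--
--     """
--     distance = 0
--     unmatched = src[:]
--     for i in range(len(unmatched) - 1, -1, -1):
--         if unmatched[i:] not in tar:
--             distance += 1
--             unmatched = unmatched[:i]
--
--     return distance
-- ===== SOURCE B (Python) =====
-- def dist_abs(src, tar):
--     """Marking distance via bit-parallel (Shift-And) matching: occ is a bitmask
--     of the positions of tar at which the current window still matches; one AND
--     and one shift per character of src, no substring search."""
--     m = len(tar)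
--     mask = {}
--     for q, c in enumerate(tar):
--         mask[c] = mask.get(c, 0) | (1 << (q + 1))
--     full = (1 << (m + 1)) - 1
--     distance = 0
--     occ = full
--     for ch in reversed(src):
--         nxt = (occ & mask.get(ch, 0)) >> 1
--         if nxt:
--             occ = nxt
--         else:
--             distance += 1
--             occ = full
--     return distance
-- ===== Notes on version B (the rewrite author's own statement) =====
-- stated objective: faster
-- what changed: A re-slices the remaining string and searches the whole current window in tar for every index; B does bit-parallel (Shift-And) matching: a precomputed per-character bitmask of tar and one AND plus one shift of an occupancy bitmask per character of src, so no substring search is ever performed.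
import Mathlib
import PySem

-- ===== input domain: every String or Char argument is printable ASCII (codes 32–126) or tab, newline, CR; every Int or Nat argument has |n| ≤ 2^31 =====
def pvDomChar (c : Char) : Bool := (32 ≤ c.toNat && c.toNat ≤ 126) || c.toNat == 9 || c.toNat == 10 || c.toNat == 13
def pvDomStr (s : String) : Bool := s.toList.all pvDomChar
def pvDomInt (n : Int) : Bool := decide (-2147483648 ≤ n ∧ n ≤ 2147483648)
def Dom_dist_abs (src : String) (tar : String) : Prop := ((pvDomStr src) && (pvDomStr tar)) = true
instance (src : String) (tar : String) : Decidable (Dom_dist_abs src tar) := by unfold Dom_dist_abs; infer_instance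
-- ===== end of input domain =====

-- B replaces A's repeated whole-window substring searches in tar by bit-parallel (Shift-And)
-- matching: occ is a bitmask of the positions of tar at which the current window still matches,
-- updated by one AND and one shift per character of src; same return value on every input.

-- ===== PORT A =====
-- loop body of A's 'for i in range(len(unmatched)-1, -1, -1)' (st = (distance, unmatched))
def stepA (t : List Char) (st : Int × List Char) (i : Int) : Int × List Char :=
  if PySem.Chars.isIn (PySem.List.slice st.2 (some i) none) t then st
  else (st.1 + 1, PySem.List.slice st.2 none (some i))

def dist_abs (src : String) (tar : String) : Int :=
  ((PySem.List.pyRange ((src.toList.length : Int) - 1) (-1) (-1)).foldl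
    (stepA tar.toList) (0, src.toList)).1

-- ===== PORT B =====
-- B's "for q, c in enumerate(tar): mask[c] = mask.get(c, 0) | (1 << (q + 1))"
-- (the shift amount q + 1 is positive, so Int.toNat is exact here)
def buildMask (t : List Char) : PySem.Dict Char Int :=
  (PySem.List.enumerate t).foldl
    (fun d p => PySem.Dict.insert d p.2
      (PySem.Int.bor (PySem.Dict.getD d p.2 0) ((1:Int) <<< (Int.toNat (p.1 + 1) : Nat))))
    PySem.Dict.empty

-- loop body of B's 'for ch in reversed(src)' (st = (distance, occ))
def stepB (mask : PySem.Dict Char Int) (full : Int) (st : Int × Int) (ch : Char) : Int × Int :=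
  let nxt := (PySem.Int.band st.2 (PySem.Dict.getD mask ch 0)) >>> (1:Nat)
  if nxt ≠ 0 then (st.1, nxt) else (st.1 + 1, full)

def dist_abs_alt (src : String) (tar : String) : Int :=
  (src.toList.reverse.foldl
    (stepB (buildMask tar.toList) (((1:Int) <<< (tar.toList.length + 1)) - 1))
    (0, ((1:Int) <<< (tar.toList.length + 1)) - 1)).1

-- ===== PRECONDITION & SPEC =====
def Spec_dist_abs (src : String) (tar : String) (out : Int) : Prop := out = dist_abs_alt src tar
instance (src : String) (tar : String) (out : Int) : Decidable (Spec_dist_abs src tar out) := by unfold Spec_dist_abs; infer_instance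

-- ===== CLAIM (what is proved, stated in full; the proofs are below) =====
def Claim_equal_dist_abs : Prop := ∀ (src : String) (tar : String), Dom_dist_abs src tar → Spec_dist_abs src tar (dist_abs src tar)

-- ===== LEMMAS AND PROOFS =====

def vec : List Bool → Nat
  | [] => 0
  | b :: bs => b.toNat + 2 * vec bs

lemma testBit_vec (bs : List Bool) (i : Nat) : (vec bs).testBit i = bs.getD i false := by
  induction bs generalizing i with
  | nil => simp [vec]
  | cons b bs ih =>
    cases i with
    | zero =>
      rw [Nat.testBit_zero]
      cases b <;> simp [vec]
    | succ i =>
      rw [Nat.testBit_succ]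
      have : (b.toNat + 2 * vec bs) / 2 = vec bs := by cases b <;> simp; omega

      rw [show vec (b :: bs) = b.toNat + 2 * vec bs from rfl, this, ih]
      simp

lemma vec_replicate_true (n : Nat) : vec (List.replicate n true) = 2 ^ n - 1 := by
  induction n with
  | zero => simp [vec]
  | succ n ih =>
    rw [List.replicate_succ, show vec (true :: List.replicate n true) = 1 + 2 * vec (List.replicate n true) from rfl, ih]
    have : 1 ≤ 2 ^ n := Nat.one_le_two_pow
    rw [pow_succ]
    omega

def posL (t w : List Char) : List Nat :=
  (List.range (t.length + 1)).filter (fun p => decide (w <+: t.drop p))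

def bitsOf (t w : List Char) : List Bool :=
  (List.range (t.length + 1)).map (fun p => decide (w <+: t.drop p))

def vecOf (t w : List Char) : Nat := vec (bitsOf t w)

lemma testBit_vecOf (t w : List Char) (i : Nat) :
    (vecOf t w).testBit i = if i < t.length + 1 then decide (w <+: t.drop i) else false := by
  rw [vecOf, testBit_vec, bitsOf, List.getD_eq_getElem?_getD, List.getElem?_map]
  by_cases h : i < t.length + 1
  · rw [List.getElem?_range h]; simp [h]
  · rw [List.getElem?_eq_none (by simpa using by omega)]; simp [h]

lemma vecOf_nil (t : List Char) : vecOf t [] = 2 ^ (t.length + 1) - 1 := by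
  have hb : bitsOf t [] = List.replicate (t.length + 1) true := by
    rw [bitsOf]
    rw [show (fun p => decide ([] <+: t.drop p)) = (fun _ : Nat => true) from by
      funext p; simp]
    simp
  rw [vecOf, hb, vec_replicate_true]

lemma vecOf_eq_zero_iff (t w : List Char) : vecOf t w = 0 ↔ posL t w = [] := by
  constructor
  · intro h
    rw [posL, List.filter_eq_nil_iff]
    intro p hp
    have := testBit_vecOf t w p
    rw [h, Nat.zero_testBit] at this
    simp only [List.mem_range] at hp
    rw [if_pos hp] at this
    simp [← this]
  · intro h
    apply Nat.eq_of_testBit_eq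
    intro i
    rw [Nat.zero_testBit, testBit_vecOf]
    by_cases hi : i < t.length + 1
    · rw [if_pos hi]
      rw [posL, List.filter_eq_nil_iff] at h
      have := h i (List.mem_range.mpr hi)
      simpa using this
    · rw [if_neg hi]

lemma pref_cons (t w : List Char) (ch : Char) (q : Nat) (hq : q < t.length) :
    (ch :: w <+: t.drop q) ↔ (t[q] = ch ∧ w <+: t.drop (q + 1)) := by
  rw [List.drop_eq_getElem_cons hq, List.cons_prefix_cons]
  tauto

def maskN (t : List Char) (ch : Char) : Nat := vec (false :: t.map (fun c => c == ch))

lemma testBit_maskN_zero (t : List Char) (ch : Char) : (maskN t ch).testBit 0 = false := by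
  rw [maskN, testBit_vec]; rfl

lemma testBit_maskN_succ (t : List Char) (ch : Char) (i : Nat) :
    (maskN t ch).testBit (i + 1) = (t.map (fun c => c == ch)).getD i false := by
  rw [maskN, testBit_vec]; rfl

lemma shiftLeft_one_int (k : Nat) : ((1:Int) <<< k) = ((2 ^ k : Nat) : Int) := by
  rw [show ((1:Int) <<< k) = ((((1:Nat) <<< k) : Nat) : Int) from by simp]
  rw [Nat.shiftLeft_eq, one_mul]

lemma getD_map_snoc (t : List Char) (ch c : Char) (i : Nat) :
    ((t ++ [c]).map (fun c' => c' == ch)).getD i false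
      = if i < t.length then (t.map (fun c' => c' == ch)).getD i false
        else if i = t.length then (c == ch) else false := by
  rw [List.map_append, List.getD_eq_getElem?_getD, List.getElem?_append]
  by_cases hi : i < t.length
  · rw [if_pos (by simpa using hi), if_pos hi, List.getD_eq_getElem?_getD]
  · rw [if_neg (by simpa using hi), if_neg hi]
    by_cases he : i = t.length
    · subst he
      simp
    · rw [if_neg he, List.getElem?_eq_none (by simp; omega)]
      rfl

lemma getD_map_beyond (t : List Char) (ch : Char) (i : Nat) (hi : ¬ i < t.length) :
    (t.map (fun c' => c' == ch)).getD i false = false := by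
  rw [List.getD_eq_getElem?_getD, List.getElem?_eq_none (by simp; omega)]
  rfl

lemma maskN_snoc (t : List Char) (c ch : Char) :
    maskN (t ++ [c]) ch = maskN t ch ||| (if c == ch then 2 ^ (t.length + 1) else 0) := by
  apply Nat.eq_of_testBit_eq
  intro i
  rw [Nat.testBit_or]
  cases i with
  | zero =>
    rw [testBit_maskN_zero, testBit_maskN_zero]
    by_cases hc : c == ch <;> simp [hc]
  | succ i =>
    rw [testBit_maskN_succ, testBit_maskN_succ, getD_map_snoc]
    by_cases hi : i < t.length
    · rw [if_pos hi]
      have h2 : ∀ z, (if c == ch then 2 ^ (t.length + 1) else (0:Nat)).testBit z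
          = (decide (t.length + 1 = z) && (c == ch)) := by
        intro z; by_cases hc : c == ch <;> simp [hc, Nat.testBit_two_pow]
      rw [h2]
      have h3 : ¬ (t.length = i) := by omega
      simp [h3]
    · rw [if_neg hi, getD_map_beyond t ch i hi]
      by_cases he : i = t.length
      · subst he
        by_cases hc : c == ch <;> simp [hc]
      · rw [if_neg he]
        have h3 : ¬ (t.length = i) := by omega
        by_cases hc : c == ch <;> simp [hc, h3]

lemma mask_getD (t : List Char) (ch : Char) :
    PySem.Dict.getD (buildMask t) ch 0 = ((maskN t ch : Nat) : Int) := by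
  induction t using List.reverseRecOn with
  | nil =>
    rw [show buildMask [] = PySem.Dict.empty from rfl, PySem.Dict.getD_empty]
    rw [show maskN [] ch = 0 from rfl]
    rfl
  | append_singleton t c ih =>
    have hstep : buildMask (t ++ [c]) = PySem.Dict.insert (buildMask t) c
        (PySem.Int.bor (PySem.Dict.getD (buildMask t) c 0)
          ((1:Int) <<< (Int.toNat ((0:Int) + ↑t.length + 1) : Nat))) := by
      rw [buildMask, PySem.List.enumerate_append,
        show PySem.List.enumerate [c] ((0:Int) + ↑t.length) = [(((0:Int) + ↑t.length), c)] from rfl,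
        List.foldl_append, List.foldl_cons, List.foldl_nil]
      rfl
    rw [hstep, PySem.Dict.getD_insert, maskN_snoc]
    have htn : Int.toNat ((0:Int) + ↑t.length + 1) = t.length + 1 := by omega
    by_cases hc : ch = c
    · subst hc
      rw [if_pos rfl, ih, htn, shiftLeft_one_int, PySem.Int.bor_natCast]
      simp
    · rw [if_neg hc, ih]
      have hcc : (c == ch) = false := beq_eq_false_iff_ne.mpr (Ne.symm hc)
      simp [hcc]

lemma full_eq (t : List Char) :
    ((1:Int) <<< (t.length + 1)) - 1 = ((vecOf t [] : Nat) : Int) := by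
  rw [vecOf_nil, shiftLeft_one_int]
  have h1 : 1 ≤ 2 ^ (t.length + 1) := Nat.one_le_two_pow
  rw [Nat.cast_sub h1, Nat.cast_one]

lemma step_eq (t w : List Char) (ch : Char) :
    (PySem.Int.band ((vecOf t w : Nat) : Int) (PySem.Dict.getD (buildMask t) ch 0)) >>> (1:Nat)
      = ((vecOf t (ch :: w) : Nat) : Int) := by
  rw [mask_getD, PySem.Int.band_natCast, ← Int.natCast_shiftRight]
  congr 1
  apply Nat.eq_of_testBit_eq
  intro i
  rw [Nat.testBit_shiftRight, show 1 + i = i + 1 from by omega, Nat.testBit_and,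
    testBit_vecOf, testBit_maskN_succ, testBit_vecOf]
  by_cases hi : i < t.length
  · rw [if_pos (by omega), if_pos (by omega),
      List.getD_eq_getElem?_getD, List.getElem?_map, List.getElem?_eq_getElem hi]
    rw [show (Option.map (fun c' => c' == ch) (some t[i])).getD false = (t[i] == ch) from rfl]
    rw [show ((t[i] == ch) : Bool) = decide (t[i] = ch) from by
      by_cases hc : t[i] = ch <;> simp [hc]]
    rw [← Bool.decide_and, decide_eq_decide]
    rw [pref_cons t w ch i hi]
    tauto
  · by_cases he : i = t.length
    · subst he
      rw [if_neg (by omega), if_pos (by omega)]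
      rw [show t.drop t.length = [] from List.drop_length]
      simp [List.prefix_nil]
    · rw [if_neg (by omega), if_neg (by omega)]
      simp

lemma posL_ne_nil_iff (t w : List Char) :
    posL t w ≠ [] ↔ PySem.Chars.isIn w t = true := by
  rw [← PySem.Chars.exists_prefix_drop_iff_isIn]
  unfold posL
  rw [Ne, List.filter_eq_nil_iff]
  push Not
  constructor
  · rintro ⟨q, _, hq⟩
    exact ⟨q, by simpa using hq⟩
  · rintro ⟨j, hj⟩
    refine ⟨min j t.length, List.mem_range.mpr (by omega), ?_⟩
    simp only [decide_eq_true_eq]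
    rcases le_or_gt j t.length with h | h
    · simpa [Nat.min_eq_left h] using hj
    · have hd : List.drop j t = [] := List.drop_eq_nil_of_le (by omega)
      have hw : w = [] := List.prefix_nil.mp (hd ▸ hj)
      simp [hw]

lemma vecOf_ne_zero_iff (t w : List Char) :
    ((vecOf t w : Nat) : Int) ≠ 0 ↔ PySem.Chars.isIn w t = true := by
  rw [← posL_ne_nil_iff]
  constructor
  · intro h hnil
    exact h (by rw [(vecOf_eq_zero_iff t w).mpr hnil]; rfl)
  · intro h hz
    exact h ((vecOf_eq_zero_iff t w).mp (by exact_mod_cast hz))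


lemma loop_eq (t s : List Char) (mask : PySem.Dict Char Int) (full : Int)
    (hmask : mask = buildMask t) (hfull : full = ((1:Int) <<< (t.length + 1)) - 1)
    (k j : Nat) (d : Int) (hkj : k ≤ j) (hj : j ≤ s.length) :
    ((PySem.List.pyRange ((k : Int) - 1) (-1) (-1)).foldl (stepA t) (d, s.take j)).1
      = (((s.take k).reverse).foldl (stepB mask full)
          (d, ((vecOf t ((s.take j).drop k) : Nat) : Int))).1 := by
  induction k generalizing j d with
  | zero =>
    rw [show ((0 : Nat) : Int) - 1 = -1 from rfl,
      PySem.List.pyRange_neg_one_eq_nil (by omega), List.take_zero]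
    rfl
  | succ k ih =>
    have hk1 : ((k + 1 : Nat) : Int) - 1 = (k : Nat) := by push_cast; ring
    rw [hk1, PySem.List.pyRange_neg_one_cons (by omega), List.foldl_cons]
    have hklen : k < s.length := by omega
    have hrev : (s.take (k + 1)).reverse = s[k] :: (s.take k).reverse := by
      rw [List.take_add_one, List.getElem?_eq_getElem hklen]
      simp
    rw [hrev, List.foldl_cons]
    have hjlen : (s.take j).length = j := List.length_take_of_le hj
    have hkj2 : k < j := by omega
    have hwin : (s.take j).drop k = s[k] :: (s.take j).drop (k + 1) := by
      rw [List.drop_eq_getElem_cons (by omega)]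
      congr 1
      exact List.getElem_take
    have hsliceA : PySem.List.slice (s.take j) (some ((k : Nat) : Int)) none = (s.take j).drop k :=
      PySem.List.slice_from_natCast _ _
    have hsliceA2 : PySem.List.slice (s.take j) none (some ((k : Nat) : Int)) = s.take k := by
      rw [PySem.List.slice_to_natCast, List.take_take]
      congr 1
      omega
    -- B's nxt is the bitmask of the extended window
    have hnxt : (PySem.Int.band ((vecOf t ((s.take j).drop (k+1)) : Nat) : Int)
          (PySem.Dict.getD mask s[k] 0)) >>> (1:Nat)
        = ((vecOf t ((s.take j).drop k) : Nat) : Int) := by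
      rw [hmask, step_eq, ← hwin]
    by_cases htest : PySem.Chars.isIn ((s.take j).drop k) t = true
    · have hne : ((vecOf t ((s.take j).drop k) : Nat) : Int) ≠ 0 :=
        (vecOf_ne_zero_iff t _).mpr htest
      rw [show stepA t (d, s.take j) ((k : Nat) : Int) = (d, s.take j) from by
        unfold stepA; simp only [hsliceA, htest, if_true]]
      rw [show stepB mask full (d, ((vecOf t ((s.take j).drop (k+1)) : Nat) : Int)) s[k]
          = (d, ((vecOf t ((s.take j).drop k) : Nat) : Int)) from by
        unfold stepB; simp only [hnxt, hne, ne_eq, not_false_iff, if_true]]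
      exact ih j d (by omega) hj
    · rw [show stepA t (d, s.take j) ((k : Nat) : Int) = (d + 1, s.take k) from by
        unfold stepA; simp only [hsliceA, htest, if_false, hsliceA2, Bool.false_eq_true]]
      have hz : ((vecOf t ((s.take j).drop k) : Nat) : Int) = 0 := by
        by_contra hne
        exact htest ((vecOf_ne_zero_iff t _).mp hne)
      rw [show stepB mask full (d, ((vecOf t ((s.take j).drop (k+1)) : Nat) : Int)) s[k]
          = (d + 1, full) from by
        unfold stepB; simp only [hnxt, hz, ne_eq, not_true, if_false]]
      have hdt : List.drop k (List.take k s) = [] := by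
        rw [List.drop_take]; simp
      have h2 := ih k (d + 1) le_rfl (by omega)
      rw [hdt] at h2
      rw [h2, hfull, full_eq]

-- ===== VERDICT (by name: the statement is the Claim_ definition above) =====
theorem dist_abs_spec : Claim_equal_dist_abs := by
  intro src tar _
  unfold Spec_dist_abs dist_abs dist_abs_alt
  have h := loop_eq tar.toList src.toList (buildMask tar.toList)
    (((1:Int) <<< (tar.toList.length + 1)) - 1) rfl rfl
    src.toList.length src.toList.length 0 le_rfl le_rfl
  simp only [List.take_length, List.drop_length] at h
  rw [h, full_eq]
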